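-- pv_equiv track=rewrite | github.com/Devanik21/EternaSeq | app.py | create_sequence_visualization
-- ===== SOURCE A (Python) =====
-- def create_sequence_visualization(sequence: str, max_length: int = 200) -> str:
--     """Create formatted sequence visualization"""
--     if len(sequence) <= max_length:
--         display_seq = sequence
--     else:
--         display_seq = sequence[:max_length] + f"... ({len(sequence)-max_length} more nucleotides)"
--
--     # Add spacing every 10 nucleotides
--     formatted = ""
--     for i, nucleotide in enumerate(display_seq):
--         if i > 0 and i % 10 == 0:
--             formatted += " "
--         if i > 0 and i % 50 == 0:
--             formatted += "\n"
--         formatted += nucleotide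
--
--     return formatted
-- ===== SOURCE B (Python) =====
-- def create_sequence_visualization(sequence: str, max_length: int = 200) -> str:
--     """Create formatted sequence visualization"""
--     if len(sequence) > max_length:
--         sequence = sequence[:max_length] + f"... ({len(sequence)-max_length} more nucleotides)"
--     chunks = [sequence[i:i+10] for i in range(0, len(sequence), 10)]
--     lines = [" ".join(chunks[j:j+5]) for j in range(0, len(chunks), 5)]
--     return " \n".join(lines)
-- ===== Notes on version B (the rewrite author's own statement) =====
-- stated objective: simpler
-- what changed: Replaces the per-character loop with index-modulus separator tests by slicing the display string into 10-character chunks and grouping 5 chunks per line, assembled with str.join; this also avoids quadratic-ish per-character string concatenation, a constant-factor speedup.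
import Mathlib
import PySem

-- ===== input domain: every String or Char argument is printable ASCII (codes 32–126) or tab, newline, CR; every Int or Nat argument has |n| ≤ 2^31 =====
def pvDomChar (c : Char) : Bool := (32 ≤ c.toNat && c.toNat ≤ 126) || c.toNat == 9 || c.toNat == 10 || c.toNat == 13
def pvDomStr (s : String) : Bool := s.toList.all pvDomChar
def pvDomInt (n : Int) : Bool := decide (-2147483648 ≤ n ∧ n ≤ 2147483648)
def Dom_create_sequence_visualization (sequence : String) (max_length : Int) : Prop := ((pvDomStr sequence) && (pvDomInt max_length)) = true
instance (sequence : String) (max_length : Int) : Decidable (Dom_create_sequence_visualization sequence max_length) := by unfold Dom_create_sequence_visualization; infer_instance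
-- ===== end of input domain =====

-- B formats the truncated display string by chunking (10-char slices, 5 chunks joined per line)
-- instead of A's per-character loop with index-modulus separator tests; objective: simpler.

-- ===== PORT A =====
-- display_seq = sequence if short enough, else sequence[:max_length] + "... (N more nucleotides)"
def pvDisplayA (sequence : String) (max_length : Int) : List Char :=
  if PySem.Str.len sequence ≤ max_length then sequence.toList
  else PySem.Chars.slice sequence.toList none (some max_length)
       ++ "... (".toList
       ++ (PySem.Int.toStr (PySem.Str.len sequence - max_length)).toList
       ++ " more nucleotides)".toList

-- the for-loop over enumerate(display_seq) accumulating `formatted`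
def pvFormatA (display_seq : List Char) : List Char :=
  (PySem.List.enumerate display_seq 0).foldl (fun acc p =>
    let acc1 := if 0 < p.1 ∧ PySem.Int.mod p.1 10 = 0 then acc ++ [' '] else acc
    let acc2 := if 0 < p.1 ∧ PySem.Int.mod p.1 50 = 0 then acc1 ++ ['\n'] else acc1
    acc2 ++ [p.2]) []

def create_sequence_visualization (sequence : String) (max_length : Int) : String :=
  String.ofList (pvFormatA (pvDisplayA sequence max_length))

-- ===== PORT B =====
-- prologue kept verbatim (B reassigns `sequence` when it is too long)
def pvDisplayB (sequence : String) (max_length : Int) : List Char :=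
  if PySem.Str.len sequence > max_length then
    PySem.Chars.slice sequence.toList none (some max_length)
    ++ "... (".toList
    ++ (PySem.Int.toStr (PySem.Str.len sequence - max_length)).toList
    ++ " more nucleotides)".toList
  else sequence.toList

-- chunks = [sequence[i:i+10] for i in range(0, len(sequence), 10)]
def pvChunksB (s : List Char) : List (List Char) :=
  (PySem.List.pyRange 0 (PySem.Chars.len s) 10).map
    (fun i => PySem.Chars.slice s (some i) (some (i + 10)))

-- lines = [" ".join(chunks[j:j+5]) for j in range(0, len(chunks), 5)]
def pvLinesB (chunks : List (List Char)) : List (List Char) :=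
  (PySem.List.pyRange 0 ((chunks.length : Int)) 5).map
    (fun j => PySem.Chars.join [' '] (PySem.List.slice chunks (some j) (some (j + 5))))

def create_sequence_visualization_alt (sequence : String) (max_length : Int) : String :=
  String.ofList (PySem.Chars.join [' ', '\n'] (pvLinesB (pvChunksB (pvDisplayB sequence max_length))))

-- ===== PRECONDITION & SPEC =====
def Spec_create_sequence_visualization (sequence : String) (max_length : Int) (out : String) : Prop := out = create_sequence_visualization_alt sequence max_length
instance (sequence : String) (max_length : Int) (out : String) : Decidable (Spec_create_sequence_visualization sequence max_length out) := by unfold Spec_create_sequence_visualization; infer_instance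

-- ===== CLAIM (what is proved, stated in full; the proofs are below) =====
def Claim_equal_create_sequence_visualization : Prop := ∀ (sequence : String) (max_length : Int), Dom_create_sequence_visualization sequence max_length → Spec_create_sequence_visualization sequence max_length (create_sequence_visualization sequence max_length)

-- ===== LEMMAS AND PROOFS =====

-- groups of c consecutive elements
def groupsOf {α : Type} (c : Nat) : List α → List (List α)
  | [] => []
  | x :: xs => (x :: xs.take (c - 1)) :: groupsOf c (xs.drop (c - 1))
termination_by l => l.length
decreasing_by simp

-- the separator A emits in front of chunk number k
def chunkSep (k : Nat) : List Char :=
  if k = 0 then [] else if k % 5 = 0 then [' ', '\n'] else [' ']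

-- chunk-level view of A's output
def fmtChunks (k : Nat) : List (List Char) → List Char
  | [] => []
  | c :: cs => chunkSep k ++ c ++ fmtChunks (k + 1) cs

-- per-character contribution of A's loop
def hA (p : Int × Char) : List Char :=
  (if 0 < p.1 ∧ PySem.Int.mod p.1 10 = 0 then [' '] else []) ++
  (if 0 < p.1 ∧ PySem.Int.mod p.1 50 = 0 then ['\n'] else []) ++ [p.2]

theorem hA_eval (i : Int) (x : Char) :
    hA (i, x) = (if 0 < i ∧ (10:Int) ∣ i then [' '] else [])
      ++ (if 0 < i ∧ (50:Int) ∣ i then ['\n'] else []) ++ [x] := by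
  simp [hA, PySem.Int.mod_eq_zero_iff_dvd]

theorem groupsOf_nil {α : Type} (c : Nat) : groupsOf c ([] : List α) = [] := by
  simp [groupsOf]

theorem groupsOf_eq {α : Type} (c : Nat) (hc : 0 < c) (l : List α) (hl : l ≠ []) :
    groupsOf c l = l.take c :: groupsOf c (l.drop c) := by
  cases l with
  | nil => exact absurd rfl hl
  | cons x xs =>
    obtain ⟨c', rfl⟩ : ∃ c', c = c' + 1 := ⟨c - 1, by omega⟩
    simp [groupsOf]

theorem pyRange_pos_nil (a b : Int) {s : Int} (hs : 0 < s) (hab : b ≤ a) :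
    PySem.List.pyRange a b s = [] := by
  rw [PySem.List.pyRange_of_pos a b hs, if_neg (not_lt.2 hab)]
  simp

theorem pyRange_pos_cons (a b : Int) {s : Int} (hs : 0 < s) (hab : a < b) :
    PySem.List.pyRange a b s = a :: PySem.List.pyRange (a + s) b s := by
  rw [PySem.List.pyRange_of_pos a b hs, PySem.List.pyRange_of_pos (a + s) b hs, if_pos hab]
  have hkey : ((b - a + s - 1) / s).toNat
      = (if a + s < b then ((b - (a + s) + s - 1) / s).toNat else 0) + 1 := by
    split_ifs with h
    · have e : b - a + s - 1 = (b - (a + s) + s - 1) + 1 * s := by ring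
      rw [e, Int.add_mul_ediv_right _ _ hs.ne']
      have hnn : (0:Int) ≤ (b - (a + s) + s - 1) / s :=
        Int.ediv_nonneg (by omega) hs.le
      omega
    · have e : b - a + s - 1 = (b - a - 1) + 1 * s := by ring
      rw [e, Int.add_mul_ediv_right _ _ hs.ne',
        Int.ediv_eq_zero_of_lt (by omega) (by omega)]
      rfl
  rw [hkey, List.range_succ_eq_map]
  simp only [List.map_cons, List.map_map, Function.comp_def, Nat.cast_zero, mul_zero, add_zero]
  congr 1
  apply List.map_congr_left
  intro k _
  push_cast
  ring

theorem map_pyRange_slice_aux {α : Type} (c : Nat) (hc : 0 < c) :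
    ∀ (n : Nat) (xs : List α) (a : Nat), xs.length ≤ a * c + n →
    (PySem.List.pyRange ((a * c : Nat) : Int) ((xs.length : Int)) (c : Int)).map
      (fun i => PySem.List.slice xs (some i) (some (i + (c : Int)))) = groupsOf c (xs.drop (a * c)) := by
  intro n
  induction n with
  | zero =>
    intro xs a h
    rw [pyRange_pos_nil _ _ (by exact_mod_cast hc) (by exact_mod_cast (by omega : xs.length ≤ a * c)),
      List.map_nil, List.drop_of_length_le (by omega), groupsOf_nil]
  | succ n ih =>
    intro xs a h
    by_cases hle : xs.length ≤ a * c
    · rw [pyRange_pos_nil _ _ (by exact_mod_cast hc) (by exact_mod_cast hle),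
        List.map_nil, List.drop_of_length_le hle, groupsOf_nil]
    · replace hle := lt_of_not_ge hle
      rw [pyRange_pos_cons _ _ (by exact_mod_cast hc) (by exact_mod_cast hle), List.map_cons]
      have hhead : PySem.List.slice xs (some ((a * c : Nat) : Int))
          (some (((a * c : Nat) : Int) + (c : Int))) = (xs.drop (a * c)).take c := by
        have := PySem.List.slice_natCast_add xs (a * c) c
        simpa using this
      have hstep : ((a * c : Nat) : Int) + (c : Int) = (((a + 1) * c : Nat) : Int) := by
        push_cast; ring
      have htail := ih xs (a + 1) (by omega)
      rw [hhead, hstep, htail,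
        groupsOf_eq c hc (xs.drop (a * c)) (by simp; omega),
        List.drop_drop]
      rw [show (a + 1) * c = a * c + c from by ring]

theorem map_pyRange_slice {α : Type} (c : Nat) (hc : 0 < c) (xs : List α) :
    (PySem.List.pyRange 0 ((xs.length : Int)) (c : Int)).map
      (fun i => PySem.List.slice xs (some i) (some (i + (c : Int)))) = groupsOf c xs := by
  have := map_pyRange_slice_aux c hc xs.length xs 0 (by omega)
  simpa using this

theorem fold_eq_flatMap (l : List Char) :
    pvFormatA l = List.flatMap hA (PySem.List.enumerate l 0) := by
  unfold pvFormatA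
  have hf : (fun (acc : List Char) (p : Int × Char) =>
      let acc1 := if 0 < p.1 ∧ PySem.Int.mod p.1 10 = 0 then acc ++ [' '] else acc
      let acc2 := if 0 < p.1 ∧ PySem.Int.mod p.1 50 = 0 then acc1 ++ ['\n'] else acc1
      acc2 ++ [p.2]) = fun acc p => acc ++ hA p := by
    funext acc p
    simp only [hA]
    split_ifs <;> simp
  rw [hf, PySem.List.foldl_append_eq_flatMap]
  simp

theorem flatMap_enumerate_no_sep (c : List Char) (s : Int)
    (h : ∀ j : Nat, j < c.length → ¬ ((10:Int) ∣ (s + j))) :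
    List.flatMap hA (PySem.List.enumerate c s) = c := by
  induction c generalizing s with
  | nil => simp [PySem.List.enumerate_nil]
  | cons x xs ih =>
    rw [PySem.List.enumerate_cons, List.flatMap_cons]
    have h0 : ¬ (10:Int) ∣ s := by simpa using h 0 (by simp)
    have hx : hA (s, x) = [x] := by
      rw [hA_eval, if_neg (fun hc => h0 hc.2),
        if_neg (fun hc => h0 (dvd_trans (by norm_num) hc.2))]
      simp
    have hih : List.flatMap hA (PySem.List.enumerate xs (s + 1)) = xs := by
      apply ih
      intro j hj
      have := h (j + 1) (by simpa using Nat.succ_lt_succ hj)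
      have e : s + ((j + 1 : Nat) : Int) = s + 1 + (j : Int) := by push_cast; ring
      rwa [e] at this
    rw [hx, hih]
    simp

theorem flatMap_enumerate_chunk (c : List Char) (k : Nat) (hne : c ≠ []) (hlen : c.length ≤ 10) :
    List.flatMap hA (PySem.List.enumerate c ((10 * k : Nat) : Int)) = chunkSep k ++ c := by
  cases c with
  | nil => exact absurd rfl hne
  | cons x xs =>
    rw [PySem.List.enumerate_cons, List.flatMap_cons]
    have hxs : xs.length ≤ 9 := by simp at hlen; omega
    have hrest : List.flatMap hA (PySem.List.enumerate xs (((10 * k : Nat) : Int) + 1)) = xs := by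
      apply flatMap_enumerate_no_sep
      intro j hj
      push_cast
      omega
    rw [hrest]
    have hhead : hA (((10 * k : Nat) : Int), x) = chunkSep k ++ [x] := by
      rw [hA_eval]
      unfold chunkSep
      rcases Nat.eq_zero_or_pos k with hk | hk
      · subst hk
        norm_num
      · have hkne : k ≠ 0 := by omega
        by_cases h5 : k % 5 = 0
        · have c50 : (50:Int) ∣ 10 * (k : Int) := by
            obtain ⟨m, rfl⟩ : ∃ m, k = 5 * m := ⟨k / 5, by omega⟩
            exact ⟨(m : Int), by push_cast; ring⟩
          simp [hk, h5, hkne, c50]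
        · have c50n : ¬ (50:Int) ∣ 10 * (k : Int) := by
            rintro ⟨m, hm⟩
            omega
          simp [hk, h5, hkne, c50n]
    rw [hhead]
    simp

theorem flatMap_eq_fmtChunks_aux :
    ∀ (n : Nat) (l : List Char), l.length ≤ n → ∀ (k : Nat),
    List.flatMap hA (PySem.List.enumerate l ((10 * k : Nat) : Int)) = fmtChunks k (groupsOf 10 l) := by
  intro n
  induction n with
  | zero =>
    intro l h k
    have : l = [] := List.eq_nil_of_length_eq_zero (by omega)
    subst this
    simp [PySem.List.enumerate_nil, groupsOf, fmtChunks]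
  | succ n ih =>
    intro l h k
    cases l with
    | nil => simp [PySem.List.enumerate_nil, groupsOf, fmtChunks]
    | cons x xs =>
      have hsplit : x :: xs = (x :: xs.take 9) ++ xs.drop 9 := by
        simp [List.take_append_drop]
      have hgroups : groupsOf 10 (x :: xs) = (x :: xs.take 9) :: groupsOf 10 (xs.drop 9) := by
        simp [groupsOf]
      have hL : List.flatMap hA (PySem.List.enumerate (x :: xs) ((10 * k : Nat) : Int))
          = chunkSep k ++ (x :: xs.take 9)
            ++ List.flatMap hA (PySem.List.enumerate (xs.drop 9)
                (((10 * k : Nat) : Int) + (((x :: xs.take 9).length : Nat) : Int))) := by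
        conv_lhs => rw [hsplit]
        rw [PySem.List.enumerate_append, List.flatMap_append,
          flatMap_enumerate_chunk (x :: xs.take 9) k (by simp) (by simp)]
      rw [hL, hgroups]
      have hfc : fmtChunks k ((x :: xs.take 9) :: groupsOf 10 (xs.drop 9))
          = chunkSep k ++ (x :: xs.take 9) ++ fmtChunks (k + 1) (groupsOf 10 (xs.drop 9)) := rfl
      rw [hfc]
      by_cases hd : xs.drop 9 = []
      · rw [hd]
        simp [PySem.List.enumerate_nil, groupsOf_nil, fmtChunks]
      · have hxs9 : 9 < xs.length := by
          by_contra hc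
          exact hd (List.drop_of_length_le (by omega))
        have hlen10 : (x :: xs.take 9).length = 10 := by simp; omega
        have hstart : ((10 * k : Nat) : Int) + (((x :: xs.take 9).length : Nat) : Int)
            = ((10 * (k + 1) : Nat) : Int) := by rw [hlen10]; push_cast; ring
        rw [hstart, ih (xs.drop 9) (by simp at h ⊢; omega) (k + 1)]

theorem join_sp (c : List Char) (cs : List (List Char)) :
    PySem.Chars.join [' '] (c :: cs) = c ++ List.flatMap (fun d => ' ' :: d) cs := by
  induction cs generalizing c with
  | nil => simp [PySem.Chars.join_singleton]
  | cons d ds ih =>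
    rw [PySem.Chars.join_cons_cons, ih d]
    simp

theorem fmtChunks_line (cs : List (List Char)) (k : Nat) (h1 : 1 ≤ k) (h2 : k + cs.length ≤ 5) :
    fmtChunks k cs = List.flatMap (fun d => ' ' :: d) cs := by
  induction cs generalizing k with
  | nil => simp [fmtChunks]
  | cons d ds ih =>
    have hsep : chunkSep k = [' '] := by
      have h2' : k % 5 ≠ 0 := by simp at h2; omega
      have h1' : ¬ (k = 0) := by omega
      simp [chunkSep, h1', h2']
    rw [show fmtChunks k (d :: ds) = chunkSep k ++ d ++ fmtChunks (k + 1) ds from rfl,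
      hsep, ih (k + 1) (by omega) (by simp at h2 ⊢; omega)]
    simp

theorem fmtChunks_shift (cs : List (List Char)) (k : Nat) :
    fmtChunks (k + 6) cs = fmtChunks (k + 1) cs := by
  induction cs generalizing k with
  | nil => rfl
  | cons d ds ih =>
    have hsep : chunkSep (k + 6) = chunkSep (k + 1) := by
      have h1 : ¬ (k + 6 = 0) := by omega
      have h2 : ¬ (k + 1 = 0) := by omega
      have h3 : (k + 6) % 5 = (k + 1) % 5 := by omega
      simp [chunkSep, h3]
    rw [show fmtChunks (k + 6) (d :: ds) = chunkSep (k + 6) ++ d ++ fmtChunks (k + 6 + 1) ds from rfl,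
      show fmtChunks (k + 1) (d :: ds) = chunkSep (k + 1) ++ d ++ fmtChunks (k + 1 + 1) ds from rfl,
      hsep, show k + 6 + 1 = (k + 1) + 6 from by omega, ih (k + 1)]

theorem fmtChunks_append (xs ys : List (List Char)) (k : Nat) :
    fmtChunks k (xs ++ ys) = fmtChunks k xs ++ fmtChunks (k + xs.length) ys := by
  induction xs generalizing k with
  | nil => simp [fmtChunks]
  | cons d ds ih =>
    rw [List.cons_append,
      show fmtChunks k (d :: (ds ++ ys)) = chunkSep k ++ d ++ fmtChunks (k + 1) (ds ++ ys) from rfl,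
      show fmtChunks k (d :: ds) = chunkSep k ++ d ++ fmtChunks (k + 1) ds from rfl,
      ih (k + 1), show k + (d :: ds).length = (k + 1) + ds.length from by simp; omega]
    simp [List.append_assoc]

theorem join_groups_eq_fmtChunks_aux :
    ∀ (n : Nat) (cs : List (List Char)), cs.length ≤ n →
    PySem.Chars.join [' ', '\n'] ((groupsOf 5 cs).map (PySem.Chars.join [' '])) = fmtChunks 0 cs := by
  intro n
  induction n with
  | zero =>
    intro cs h
    have : cs = [] := List.eq_nil_of_length_eq_zero (by omega)
    subst this
    simp [groupsOf, fmtChunks, PySem.Chars.join_nil]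
  | succ n ih =>
    intro cs h
    cases cs with
    | nil => simp [groupsOf, fmtChunks, PySem.Chars.join_nil]
    | cons c cs' =>
      rw [groupsOf_eq 5 (by omega) (c :: cs') (by simp), List.map_cons]
      have htake : (c :: cs').take 5 = c :: cs'.take 4 := by rfl
      by_cases hd : (c :: cs').drop 5 = []
      · have hlen : cs'.length ≤ 4 := by
          by_contra hc
          have : 5 ≤ (c :: cs').length := by simp; omega
          simp [List.drop_eq_nil_iff] at hd
          omega
        have htk : (c :: cs').take 5 = c :: cs' := List.take_of_length_le (by simp; omega)
        rw [hd, htk]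
        rw [groupsOf_nil, List.map_nil, PySem.Chars.join_singleton, join_sp,
          show fmtChunks 0 (c :: cs') = chunkSep 0 ++ c ++ fmtChunks 1 cs' from rfl,
          fmtChunks_line cs' 1 (by omega) (by omega)]
        simp [chunkSep]
      · -- at least 6 chunks: cs'.length ≥ 5
        have hxs5 : 5 ≤ cs'.length := by
          by_contra hc
          exact hd (List.drop_of_length_le (by simp; omega))
        have hdrop := groupsOf_eq 5 (by omega) ((c :: cs').drop 5) hd
        rw [hdrop, List.map_cons, PySem.Chars.join_cons_cons, ← List.map_cons, ← hdrop]
        rw [ih ((c :: cs').drop 5) (by simp at h ⊢; omega)]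
        -- right side
        have hsplit : c :: cs' = (c :: cs').take 5 ++ (c :: cs').drop 5 :=
          (List.take_append_drop 5 (c :: cs')).symm
        rw [show fmtChunks 0 (c :: cs')
            = fmtChunks 0 ((c :: cs').take 5 ++ (c :: cs').drop 5) from by rw [← hsplit]]
        rw [fmtChunks_append, show ((c :: cs').take 5).length = 5 from by simp; omega]
        have hline : fmtChunks 0 ((c :: cs').take 5) = PySem.Chars.join [' '] ((c :: cs').take 5) := by
          rw [htake, join_sp,
            show fmtChunks 0 (c :: cs'.take 4) = chunkSep 0 ++ c ++ fmtChunks 1 (cs'.take 4) from rfl,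
            fmtChunks_line (cs'.take 4) 1 (by omega) (by simp; omega)]
          simp [chunkSep]
        have hfive : fmtChunks (0 + 5) ((c :: cs').drop 5)
            = [' ', '\n'] ++ fmtChunks 0 ((c :: cs').drop 5) := by
          cases hdd : (c :: cs').drop 5 with
          | nil => exact absurd hdd hd
          | cons d ds =>
            rw [show fmtChunks (0 + 5) (d :: ds) = chunkSep 5 ++ d ++ fmtChunks 6 ds from rfl,
              show fmtChunks 0 (d :: ds) = chunkSep 0 ++ d ++ fmtChunks 1 ds from rfl,
              show (6 : Nat) = 0 + 6 from rfl, fmtChunks_shift ds 0]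
            simp [chunkSep]
        rw [hfive, hline]
        simp [List.append_assoc]

-- A's loop output equals B's chunk/line pipeline, on any display string
theorem AB (l : List Char) :
    pvFormatA l = PySem.Chars.join [' ', '\n'] (pvLinesB (pvChunksB l)) := by
  have hchunks : pvChunksB l = groupsOf 10 l := by
    unfold pvChunksB
    have := map_pyRange_slice 10 (by omega) l
    simpa using this
  have hlines : pvLinesB (groupsOf 10 l) = (groupsOf 5 (groupsOf 10 l)).map (PySem.Chars.join [' ']) := by
    unfold pvLinesB
    have := congrArg (List.map (PySem.Chars.join [' ']))
      (map_pyRange_slice 5 (by omega) (groupsOf 10 l))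
    rw [List.map_map] at this
    simpa [Function.comp_def] using this
  rw [fold_eq_flatMap l,
    show PySem.List.enumerate l 0 = PySem.List.enumerate l ((10 * 0 : Nat) : Int) from by norm_num,
    flatMap_eq_fmtChunks_aux l.length l (le_refl _) 0,
    hchunks, hlines,
    join_groups_eq_fmtChunks_aux (groupsOf 10 l).length (groupsOf 10 l) (le_refl _)]

theorem display_eq (sequence : String) (max_length : Int) :
    pvDisplayA sequence max_length = pvDisplayB sequence max_length := by
  unfold pvDisplayA pvDisplayB
  split_ifs with h1 h2 <;> first | rfl | omega

-- ===== VERDICT (by name: the statement is the Claim_ definition above) =====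
theorem create_sequence_visualization_spec : Claim_equal_create_sequence_visualization := by
  intro sequence max_length _
  unfold Spec_create_sequence_visualization create_sequence_visualization create_sequence_visualization_alt
  rw [display_eq, AB]
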